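-- pv_equiv track=rewrite | github.com/WangZhSi/Bioinformatics_tool | convert_agp/convert_agp.py | insert_gap
-- ===== SOURCE A (Python) =====
-- from collections import defaultdict, OrderedDict
--
-- def group_contigs_by_chrom(contigs: list):
--     """
--     return:
--     chrom_order: list of chrom ids
--     chrom_groups: dict of chrom groups
--     {chrom: [(contig, strand, pos), ...]}
--     """
--     chrom_order = []
--     chrom_groups = OrderedDict()
--     for chrom, contig, strand, pos in contigs:
--         if chrom not in chrom_groups:
--             chrom_groups[chrom] = []
--             chrom_order.append(chrom)
--         chrom_groups[chrom].append((contig, strand, pos))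
--     return chrom_order, chrom_groups
--
-- def insert_gap(contigs: list) -> list:
--     """
--     insert gap between contigs
--     return: [(chrom, contig, strand, pos), (chrom, "gap", strand, pos)]
--     """
--     chrom_order, chrom_groups = group_contigs_by_chrom(contigs)
--
--     processed = []
--
--     for chrom in chrom_order:
--         group = chrom_groups[chrom]
--         sorted_group = sorted(group, key=lambda x: x[2])
--
--         with_gaps = []
--         for i, (contig_name, strand, pos) in enumerate(sorted_group):
--             with_gaps.append((chrom, contig_name, strand, pos))
--
--             if i < len(sorted_group) - 1:
--                 with_gaps.append((chrom, "GAP", ".", 0))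
--
--         processed.extend(with_gaps)
--
--     return processed
-- ===== SOURCE B (Python) =====
-- def insert_gap(contigs: list) -> list:
--     """
--     insert gap between contigs
--     return: [(chrom, contig, strand, pos), (chrom, "gap", strand, pos)]
--     """
--     rank = {}
--     for chrom, _, _, _ in contigs:
--         if chrom not in rank:
--             rank[chrom] = len(rank)
--
--     ordered = sorted(contigs, key=lambda x: (rank[x[0]], x[3]))
--
--     out = []
--     prev = None
--     for chrom, contig, strand, pos in ordered:
--         if chrom == prev:
--             out.append((chrom, "GAP", ".", 0))
--         out.append((chrom, contig, strand, pos))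
--         prev = chrom
--     return out
-- ===== Notes on version B (the rewrite author's own statement) =====
-- stated objective: alternative
-- what changed: Replaces A's dict-of-groups plus per-chrom sort-and-enumerate interleaving by a first-appearance rank dict, one global stable sort of all contigs by (rank, pos), and a single pass that inserts a gap whenever the previous row has the same chrom.
import Mathlib
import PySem

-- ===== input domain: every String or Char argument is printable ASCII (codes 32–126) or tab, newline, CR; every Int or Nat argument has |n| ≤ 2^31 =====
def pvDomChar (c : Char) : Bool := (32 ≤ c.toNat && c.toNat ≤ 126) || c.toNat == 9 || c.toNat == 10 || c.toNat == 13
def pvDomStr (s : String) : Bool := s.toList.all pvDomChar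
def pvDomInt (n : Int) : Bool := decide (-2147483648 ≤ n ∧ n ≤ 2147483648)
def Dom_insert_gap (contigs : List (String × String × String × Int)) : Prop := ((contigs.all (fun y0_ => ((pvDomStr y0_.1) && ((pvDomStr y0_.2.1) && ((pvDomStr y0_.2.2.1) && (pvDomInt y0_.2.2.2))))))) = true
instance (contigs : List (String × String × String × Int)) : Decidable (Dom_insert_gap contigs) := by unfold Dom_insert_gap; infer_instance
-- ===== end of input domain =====

-- B replaces A's dict-of-groups + per-group sort/interleave by a first-appearance rank dict, ONE global
-- stable sort by (rank, pos) and a single gap-inserting pass; same return value, proved equivalent.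

-- ===== PORT A =====
-- Python helper group_contigs_by_chrom: dict of chrom -> [(contig, strand, pos)] plus first-appearance order
def group_contigs_by_chrom (contigs : List (String × String × String × Int)) :
    List String × PySem.Dict String (List (String × String × Int)) :=
  contigs.foldl (fun st x =>
      let st := if st.2.contains x.1 then st else (st.1 ++ [x.1], st.2.insert x.1 [])
      (st.1, st.2.modify x.1 [] (fun g => g ++ [(x.2.1, x.2.2.1, x.2.2.2)])))
    ([], PySem.Dict.empty)

-- enumerate(xs) is ported via List.zipIdx ((item, index) pairs, indices from 0) — exact
def insert_gap (contigs : List (String × String × String × Int)) : List (String × String × String × Int) :=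
  let oc := group_contigs_by_chrom contigs
  oc.1.foldl (fun processed chrom =>
      let group := oc.2.getD chrom []
      let sorted_group := PySem.List.sorted group (fun t => t.2.2) false
      let with_gaps := (sorted_group.zipIdx).foldl (fun wg it =>
          let wg := wg ++ [(chrom, it.1.1, it.1.2.1, it.1.2.2)]
          if (it.2 : Int) < (sorted_group.length : Int) - 1 then wg ++ [(chrom, "GAP", ".", 0)] else wg) []
      processed ++ with_gaps) []

-- ===== PORT B =====
def insert_gap_alt (contigs : List (String × String × String × Int)) : List (String × String × String × Int) :=
  let rank := contigs.foldl (fun (r : PySem.Dict String Int) x =>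
      if r.contains x.1 then r else r.insert x.1 (r.size : Int)) PySem.Dict.empty
  let ordered := PySem.List.sorted2 contigs (fun x => rank.getD x.1 0) (fun x => x.2.2.2) false
  (ordered.foldl (fun (st : List (String × String × String × Int) × Option String) x =>
      ((if st.2 == some x.1 then st.1 ++ [(x.1, "GAP", ".", 0)] else st.1) ++ [x], some x.1))
    ([], none)).1

-- ===== PRECONDITION & SPEC =====
def Spec_insert_gap (contigs : List (String × String × String × Int)) (out : List (String × String × String × Int)) : Prop := out = insert_gap_alt contigs
instance (contigs : List (String × String × String × Int)) (out : List (String × String × String × Int)) : Decidable (Spec_insert_gap contigs out) := by unfold Spec_insert_gap; infer_instance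

-- ===== CLAIM (what is proved, stated in full; the proofs are below) =====
def Claim_equal_insert_gap : Prop := ∀ (contigs : List (String × String × String × Int)), Dom_insert_gap contigs → Spec_insert_gap contigs (insert_gap contigs)

-- ===== LEMMAS AND PROOFS =====

-- abbreviations used only by the proofs
def pvGap (c : String) : String × String × String × Int := (c, "GAP", ".", 0)
def pvProj (x : String × String × String × Int) : String × String × Int := (x.2.1, x.2.2.1, x.2.2.2)
def pvAtt (c : String) (t : String × String × Int) : String × String × String × Int := (c, t.1, t.2.1, t.2.2)
def pvGrp (p : List (String × String × String × Int)) (c : String) : List (String × String × String × Int) :=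
  p.filter (fun x => x.1 == c)
def pvSg (p : List (String × String × String × Int)) (c : String) : List (String × String × String × Int) :=
  PySem.List.sorted (pvGrp p c) (fun x => x.2.2.2) false
def pvGapifyF {A : Type} (f : A → (String × String × String × Int)) (c : String)
    (l : List A) : List (String × String × String × Int) :=
  match l with
  | [] => []
  | h :: t => f h :: t.flatMap (fun y => [pvGap c, f y])
def pvGapify (c : String) (l : List (String × String × String × Int)) : List (String × String × String × Int) :=
  pvGapifyF id c l
def pvLt (k1 k2 : (String × String × String × Int) → Int) (a b : String × String × String × Int) : Bool :=
  decide (k1 a < k1 b) || (!decide (k1 b < k1 a) && decide (k2 a < k2 b))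
def pvPosLt (a b : String × String × String × Int) : Bool := decide (a.2.2.2 < b.2.2.2)

-- insertBy base facts
lemma pvInsertBy_nil {α : Type} (bf : α → α → Bool) (x : α) : PySem.List.insertBy bf x [] = [x] := rfl

lemma pvInsertBy_cons {α : Type} (bf : α → α → Bool) (x y : α) (ys : List α) :
    PySem.List.insertBy bf x (y :: ys) = if bf x y then x :: y :: ys else y :: PySem.List.insertBy bf x ys := rfl

lemma pvInsertBy_skip {α : Type} (bf : α → α → Bool) (x : α) (b r : List α)
    (h : ∀ y ∈ b, bf x y = false) :
    PySem.List.insertBy bf x (b ++ r) = b ++ PySem.List.insertBy bf x r := by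
  induction b with
  | nil => simp
  | cons z b ih =>
      have hz : bf x z = false := h z (by simp)
      simp [pvInsertBy_cons, hz, ih (fun y hy => h y (by simp [hy]))]

lemma pvInsertBy_front {α : Type} (bf : α → α → Bool) (x : α) (b r : List α)
    (h : ∀ y ∈ r, bf x y = true) :
    PySem.List.insertBy bf x (b ++ r) = PySem.List.insertBy bf x b ++ r := by
  induction b with
  | nil =>
      cases r with
      | nil => simp
      | cons z r => simp [pvInsertBy_cons, pvInsertBy_nil, h z (by simp)]
  | cons z b ih =>
      by_cases hz : bf x z = true
      · simp [pvInsertBy_cons, hz]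
      · simp only [List.cons_append, pvInsertBy_cons, hz]
        simp [ih]

lemma pvInsertBy_congr {α : Type} (bf bf' : α → α → Bool) (x : α) (l : List α)
    (h : ∀ y ∈ l, bf x y = bf' x y) :
    PySem.List.insertBy bf x l = PySem.List.insertBy bf' x l := by
  induction l with
  | nil => rfl
  | cons z l ih =>
      have hz := h z (by simp)
      rw [pvInsertBy_cons, pvInsertBy_cons, hz, ih (fun y hy => h y (by simp [hy]))]

lemma pvMem_insertBy {α : Type} (bf : α → α → Bool) (x y : α) (l : List α)
    (h : y ∈ PySem.List.insertBy bf x l) : y = x ∨ y ∈ l := by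
  induction l with
  | nil => exact Or.inl (by simpa [pvInsertBy_nil] using h)
  | cons z l ih =>
      rw [pvInsertBy_cons] at h
      by_cases hz : bf x z = true
      · simp [hz] at h
        rcases h with h | h | h
        · exact Or.inl h
        · exact Or.inr (by simp [h])
        · exact Or.inr (by simp [h])
      · simp [hz] at h
        rcases h with h | h
        · exact Or.inr (by simp [h])
        · rcases ih h with h | h
          · exact Or.inl h
          · exact Or.inr (by simp [h])

lemma pvInsertBy_map {α β : Type} (f : α → β) (bf : β → β → Bool) (x : α) (acc : List α) :
    PySem.List.insertBy bf (f x) (acc.map f) =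
      (PySem.List.insertBy (fun a b => bf (f a) (f b)) x acc).map f := by
  induction acc with
  | nil => rfl
  | cons z l ih =>
      rw [List.map_cons, pvInsertBy_cons, pvInsertBy_cons]
      by_cases hz : bf (f x) (f z) = true
      · simp [hz]
      · simp [hz, ih]

-- stable sort commutes with map
lemma pvSortedFold_map {α β κ : Type} [LinearOrder κ] (f : α → β) (key : β → κ) :
    ∀ (l acc : List α),
      (l.map f).foldl (fun a y => PySem.List.insertBy (fun u v => decide (key u < key v)) y a) (acc.map f)
      = (l.foldl (fun a y => PySem.List.insertBy (fun u v => decide (key (f u) < key (f v))) y a) acc).map f := by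
  intro l
  induction l with
  | nil => intro acc; rfl
  | cons z l ih =>
      intro acc
      rw [List.map_cons, List.foldl_cons, List.foldl_cons, pvInsertBy_map]
      exact ih _

lemma pvSorted_map {α β κ : Type} [LinearOrder κ] (f : α → β) (key : β → κ) (l : List α) :
    PySem.List.sorted (l.map f) key false
      = (PySem.List.sorted l (fun y => key (f y)) false).map f := by
  rw [PySem.List.sorted_eq_foldl_insertBy, PySem.List.sorted_eq_foldl_insertBy]
  have := pvSortedFold_map f key l []
  simpa using this

-- dedup through an appended element
lemma pvOfList_append {α : Type} [BEq α] [LawfulBEq α] (l : List α) (a : α) :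
    PySem.Set.ofList (l ++ [a]) = if a ∈ l then PySem.Set.ofList l else PySem.Set.ofList l ++ [a] := by
  have h1 : PySem.Set.ofList (l ++ [a]) = PySem.Set.add (PySem.Set.ofList l) a := by
    simp only [PySem.Set.ofList, List.foldl_append, List.foldl_cons, List.foldl_nil]
  rw [h1]
  unfold PySem.Set.add
  by_cases hm : a ∈ l
  · have hmem : a ∈ PySem.Set.ofList l := (PySem.Set.mem_ofList l a).mpr hm
    simp [PySem.Set.contains, hmem, hm]
  · have hmem : a ∉ PySem.Set.ofList l := fun h => hm ((PySem.Set.mem_ofList l a).mp h)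
    simp [PySem.Set.contains, hmem, hm]

lemma pvDedup_append {α : Type} [BEq α] [LawfulBEq α] (l : List α) (a : α) :
    PySem.List.dedup (l ++ [a]) = if a ∈ l then PySem.List.dedup l else PySem.List.dedup l ++ [a] := by
  simp only [PySem.List.dedup_eq_ofList]
  exact pvOfList_append l a

-- idxOf is strictly increasing along a Nodup list
lemma pvPairwise_idxOf {α : Type} [DecidableEq α] (D : List α) (hD : D.Nodup) :
    D.Pairwise (fun a b => D.idxOf a < D.idxOf b) := by
  rw [List.pairwise_iff_getElem]
  intro i j hi hj hij
  rw [hD.idxOf_getElem, hD.idxOf_getElem]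
  exact hij

-- === the key stability lemma: inserting into a concatenation of rank-blocks ===
lemma pvINSB (K : String → Int) (k2 : (String × String × String × Int) → Int)
    (Ds : List String) (g : String → List (String × String × String × Int))
    (x : String × String × String × Int)
    (hpw : Ds.Pairwise (fun a b => K a < K b)) (hx : x.1 ∈ Ds)
    (hkey : ∀ c ∈ Ds, ∀ y ∈ g c, (fun y => K y.1) y = K c) :
    PySem.List.insertBy (pvLt (fun y => K y.1) k2) x (Ds.flatMap g)
      = Ds.flatMap (fun c => if c = x.1 then PySem.List.insertBy (fun a b => decide (k2 a < k2 b)) x (g c) else g c) := by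
  induction Ds with
  | nil => simp at hx
  | cons c Ds ih =>
      have hpw' := (List.pairwise_cons.mp hpw).2
      have hlt := (List.pairwise_cons.mp hpw).1
      by_cases hc : c = x.1
      · subst hc
        rw [List.flatMap_cons, List.flatMap_cons]
        have hfront : ∀ y ∈ Ds.flatMap g, pvLt (fun y => K y.1) k2 x y = true := by
          intro y hy
          rcases List.mem_flatMap.mp hy with ⟨c', hc', hyc'⟩
          have hky : K y.1 = K c' := hkey c' (by simp [hc']) y hyc'
          have : K x.1 < K c' := hlt c' hc'
          simp [pvLt, hky, this]
        rw [pvInsertBy_front _ _ _ _ hfront]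
        have hcongr : PySem.List.insertBy (pvLt (fun y => K y.1) k2) x (g x.1)
            = PySem.List.insertBy (fun a b => decide (k2 a < k2 b)) x (g x.1) := by
          apply pvInsertBy_congr
          intro y hy
          have hky : K y.1 = K x.1 := hkey x.1 (by simp) y hy
          simp [pvLt, hky]
        rw [hcongr]
        have hrest : Ds.flatMap (fun c => if c = x.1 then PySem.List.insertBy (fun a b => decide (k2 a < k2 b)) x (g c) else g c) = Ds.flatMap g := by
          apply List.flatMap_congr
          intro c' hc'
          have hne : c' ≠ x.1 := by
            intro h
            have hlt' := hlt c' hc'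
            rw [h] at hlt'
            exact absurd hlt' (lt_irrefl _)
          simp [hne]
        rw [hrest]
        simp
      · have hx' : x.1 ∈ Ds := by
          rcases List.mem_cons.mp hx with h | h
          · exact absurd h.symm hc
          · exact h
        rw [List.flatMap_cons, List.flatMap_cons]
        have hskip : ∀ y ∈ g c, pvLt (fun y => K y.1) k2 x y = false := by
          intro y hy
          have hky : K y.1 = K c := hkey c (by simp) y hy
          have hcx : K c < K x.1 := hlt x.1 hx'
          simp only [pvLt, hky]
          have h1 : ¬ (K x.1 < K c) := by omega
          have h2 : K c < K x.1 := hcx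
          simp [h1, h2]
        rw [pvInsertBy_skip _ _ _ _ hskip]
        have : (if c = x.1 then PySem.List.insertBy (fun a b => decide (k2 a < k2 b)) x (g c) else g c) = g c := by simp [hc]
        rw [this, ih hpw' hx' (fun c' hc' => hkey c' (by simp [hc']))]

-- sorted2 unfolds to an insertBy fold
lemma pvSorted2_eq_foldl (xs : List (String × String × String × Int))
    (k1 k2 : (String × String × String × Int) → Int) :
    PySem.List.sorted2 xs k1 k2 false
      = xs.foldl (fun acc x => PySem.List.insertBy (pvLt k1 k2) x acc) [] := rfl

-- key-congruence for the sorted2 fold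
lemma pvSorted2_key_congr (k1 k1' k2 : (String × String × String × Int) → Int) :
    ∀ (p acc : List (String × String × String × Int)),
      (∀ a ∈ p, k1 a = k1' a) → (∀ a ∈ acc, k1 a = k1' a) →
      p.foldl (fun acc x => PySem.List.insertBy (pvLt k1 k2) x acc) acc
        = p.foldl (fun acc x => PySem.List.insertBy (pvLt k1' k2) x acc) acc := by
  intro p
  induction p with
  | nil => intro acc _ _; rfl
  | cons z p ih =>
      intro acc hp hacc
      rw [List.foldl_cons, List.foldl_cons]
      have hz := hp z (by simp)
      have h1 : PySem.List.insertBy (pvLt k1 k2) z acc = PySem.List.insertBy (pvLt k1' k2) z acc := by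
        apply pvInsertBy_congr
        intro y hy
        simp [pvLt, hz, hacc y hy]
      rw [h1]
      apply ih
      · intro a ha; exact hp a (by simp [ha])
      · intro a ha
        rcases pvMem_insertBy _ _ _ _ ha with h | h
        · subst h; exact hz
        · exact hacc a h

-- pvSg through an appended element
lemma pvSg_append (p : List (String × String × String × Int)) (x : String × String × String × Int) (c : String) :
    pvSg (p ++ [x]) c = if c = x.1 then PySem.List.insertBy pvPosLt x (pvSg p c) else pvSg p c := by
  unfold pvSg pvGrp
  rw [List.filter_append]
  by_cases hc : c = x.1
  · subst hc
    rw [if_pos rfl]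
    have hfilt : List.filter (fun y => y.1 == x.1) [x] = [x] := by simp
    rw [hfilt, PySem.List.sorted_eq_foldl_insertBy, PySem.List.sorted_eq_foldl_insertBy,
      List.foldl_append, List.foldl_cons, List.foldl_nil]
    rfl
  · have : (x.1 == c) = false := by simp [beq_eq_false_iff_ne]; exact fun h => hc h.symm
    simp [List.filter_cons, this, hc]

-- members of pvSg p c carry chrom c
lemma pvSg_mem_fst (p : List (String × String × String × Int)) (c : String)
    (y : String × String × String × Int) (hy : y ∈ pvSg p c) : y.1 = c := by
  unfold pvSg at hy
  have := (PySem.List.mem_sorted _ _ _ _).mp hy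
  unfold pvGrp at this
  have := List.of_mem_filter this
  simpa using this

-- === the sorted2 decomposition into per-chrom pos-sorted blocks ===
lemma pvSorted2Blocks (D : List String) (hD : D.Nodup)
    (p : List (String × String × String × Int)) (hp : ∀ x ∈ p, x.1 ∈ D) :
    PySem.List.sorted2 p (fun x => (D.idxOf x.1 : Int)) (fun x => x.2.2.2) false
      = D.flatMap (fun c => pvSg p c) := by
  induction p using List.reverseRecOn with
  | nil =>
      rw [pvSorted2_eq_foldl]
      simp [pvSg, pvGrp, PySem.List.sorted_eq_foldl_insertBy]
  | append_singleton p x ih =>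
      have hp' : ∀ y ∈ p, y.1 ∈ D := fun y hy => hp y (by simp [hy])
      have hx : x.1 ∈ D := hp x (by simp)
      rw [pvSorted2_eq_foldl, List.foldl_append, List.foldl_cons, List.foldl_nil,
        ← pvSorted2_eq_foldl, ih hp']
      have hpw : D.Pairwise (fun a b => (D.idxOf a : Int) < (D.idxOf b : Int)) := by
        have := pvPairwise_idxOf D hD
        exact this.imp (by intro a b h; exact_mod_cast h)
      have := pvINSB (fun c => (D.idxOf c : Int)) (fun x => x.2.2.2) D (fun c => pvSg p c) x hpw hx
        (fun c hc y hy => by simp [pvSg_mem_fst p c y hy])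
      rw [this]
      apply List.flatMap_congr
      intro c hc
      rw [pvSg_append]
      split_ifs with h
      · rfl
      · rfl

-- zipIdx facts used by the rank-dict characterisation
lemma pvZipIdxAny {A : Type} (f : A → Bool) : ∀ (l : List A) (j : Nat),
    (l.zipIdx j).any (fun q => f q.1) = l.any f := by
  intro l
  induction l with
  | nil => intro j; rfl
  | cons h t ih => intro j; rw [List.zipIdx_cons]; simp [ih]

lemma pvMem_zipIdx {A : Type} : ∀ (l : List A) (j i : Nat) (hi : i < l.length),
    (l[i], j + i) ∈ l.zipIdx j := by
  intro l
  induction l with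
  | nil => intro j i hi; simp at hi
  | cons h t ih =>
      intro j i hi
      rw [List.zipIdx_cons]
      cases i with
      | zero => simp
      | succ i =>
          right
          have := ih (j + 1) i (by simpa using hi)
          simpa [Nat.add_assoc, Nat.add_comm 1 i] using this

lemma pvMapFstZipIdx {A : Type} : ∀ (l : List A) (j : Nat), (l.zipIdx j).map (fun q => q.1) = l := by
  intro l
  induction l with
  | nil => intro j; rfl
  | cons h t ih => intro j; rw [List.zipIdx_cons]; simp [ih]

-- === characterisation of B's rank dict ===
def pvRank (p : List (String × String × String × Int)) : PySem.Dict String Int :=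
  p.foldl (fun (r : PySem.Dict String Int) x =>
      if r.contains x.1 then r else r.insert x.1 (r.size : Int)) PySem.Dict.empty

lemma pvRank_items (p : List (String × String × String × Int)) :
    (pvRank p).items = (PySem.List.dedup (p.map (fun x => x.1))).zipIdx.map (fun q => (q.1, (q.2 : Int))) := by
  induction p using List.reverseRecOn with
  | nil => rfl
  | append_singleton p x ih =>
      have hstep : pvRank (p ++ [x]) =
          (if (pvRank p).contains x.1 then pvRank p else (pvRank p).insert x.1 ((pvRank p).size : Int)) := by
        unfold pvRank
        rw [List.foldl_append, List.foldl_cons, List.foldl_nil]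
      have hcont : (pvRank p).contains x.1 = decide (x.1 ∈ p.map (fun x => x.1)) := by
        show ((pvRank p).items.any fun q => q.1 == x.1) = _
        rw [ih, List.any_map]
        have hcomp : ((fun (q : String × Int) => q.1 == x.1) ∘ (fun (q : String × Nat) => (q.1, (q.2 : Int))))
            = fun (q : String × Nat) => q.1 == x.1 := rfl
        rw [hcomp]
        have hz := pvZipIdxAny (fun a => a == x.1) (PySem.List.dedup (p.map (fun x => x.1))) 0
        rw [hz, Bool.eq_iff_iff]
        simp [List.any_eq_true, PySem.List.mem_dedup]
      by_cases hm : x.1 ∈ p.map (fun x => x.1)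
      · have hcc : (pvRank p).contains x.1 = true := by rw [hcont]; simp [hm]
        have hd : PySem.List.dedup ((p ++ [x]).map (fun x => x.1)) = PySem.List.dedup (p.map (fun x => x.1)) := by
          rw [List.map_append]; simp only [List.map_cons, List.map_nil]
          rw [pvDedup_append]; simp [hm]
        rw [hstep, if_pos hcc, ih, hd]
      · have hnc : (pvRank p).contains x.1 = false := by rw [hcont]; simp [hm]
        have hd : PySem.List.dedup ((p ++ [x]).map (fun x => x.1))
            = PySem.List.dedup (p.map (fun x => x.1)) ++ [x.1] := by
          rw [List.map_append]; simp only [List.map_cons, List.map_nil]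
          rw [pvDedup_append]; simp [hm]
        have hlen : ((pvRank p).size : Int) = ((PySem.List.dedup (p.map (fun x => x.1))).length : Int) := by
          show (((pvRank p).items.length : Nat) : Int) = _
          rw [ih]; simp
        rw [hstep, if_neg (by simp [hnc]), PySem.Dict.items_insert_of_not_contains _ _ hnc, ih, hd,
          List.zipIdx_append, List.map_append]
        simp [hlen]

lemma pvRank_getD (p : List (String × String × String × Int)) (c : String)
    (hc : c ∈ PySem.List.dedup (p.map (fun x => x.1))) :
    (pvRank p).getD c 0 = ((PySem.List.dedup (p.map (fun x => x.1))).idxOf c : Int) := by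
  set D := PySem.List.dedup (p.map (fun x => x.1)) with hDdef
  have hnd : D.Nodup := PySem.List.nodup_dedup _
  rcases List.getElem_of_mem hc with ⟨i, hi, hgi⟩
  have hidx : D.idxOf c = i := by rw [← hgi]; exact hnd.idxOf_getElem _ _
  have hmemItems : (c, (i : Int)) ∈ (pvRank p).items := by
    rw [pvRank_items, ← hDdef]
    refine List.mem_map.mpr ⟨(c, i), ?_, rfl⟩
    have := pvMem_zipIdx D 0 i hi
    simpa [hgi] using this
  have hkeys : (pvRank p).keys.Nodup := by
    show ((pvRank p).items.map (fun q => q.1)).Nodup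
    rw [pvRank_items, ← hDdef, List.map_map]
    have hcomp : ((fun (q : String × Int) => q.1) ∘ (fun (q : String × Nat) => (q.1, (q.2 : Int))))
        = fun (q : String × Nat) => q.1 := rfl
    rw [hcomp, pvMapFstZipIdx]
    exact hnd
  rw [PySem.Dict.getD_of_mem_items _ hmemItems hkeys, hidx]

-- === characterisation of A's grouping fold ===
lemma pvGroupChar (p : List (String × String × String × Int)) :
    (group_contigs_by_chrom p).1 = PySem.List.dedup (p.map (fun x => x.1))
    ∧ (∀ c, (group_contigs_by_chrom p).2.contains c = decide (c ∈ p.map (fun x => x.1)))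
    ∧ (∀ c, (group_contigs_by_chrom p).2.getD c [] = (pvGrp p c).map pvProj) := by
  induction p using List.reverseRecOn with
  | nil =>
      refine ⟨rfl, ?_, ?_⟩
      · intro c; rfl
      · intro c; rfl
  | append_singleton p x ih =>
      obtain ⟨ih1, ih2, ih3⟩ := ih
      have hstep : group_contigs_by_chrom (p ++ [x]) =
          ((if (group_contigs_by_chrom p).2.contains x.1 then group_contigs_by_chrom p
              else ((group_contigs_by_chrom p).1 ++ [x.1], (group_contigs_by_chrom p).2.insert x.1 [])).1,
           (if (group_contigs_by_chrom p).2.contains x.1 then group_contigs_by_chrom p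
              else ((group_contigs_by_chrom p).1 ++ [x.1], (group_contigs_by_chrom p).2.insert x.1 [])).2.modify
             x.1 [] (fun g => g ++ [(x.2.1, x.2.2.1, x.2.2.2)])) := by
        unfold group_contigs_by_chrom
        rw [List.foldl_append, List.foldl_cons, List.foldl_nil]
      by_cases hm : x.1 ∈ p.map (fun x => x.1)
      · have hc : (group_contigs_by_chrom p).2.contains x.1 = true := by rw [ih2]; simp [hm]
        rw [hstep, if_pos hc]
        refine ⟨?_, ?_, ?_⟩
        · rw [ih1, List.map_append]; simp only [List.map_cons, List.map_nil]
          rw [pvDedup_append]; simp [hm]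
        · intro c
          rw [PySem.Dict.contains_modify, ih2, Bool.eq_iff_iff, List.map_append]
          simp [List.mem_append, or_comm]
        · intro c
          simp only [PySem.Dict.modify]
          rw [PySem.Dict.getD_insert]
          unfold pvGrp
          rw [List.filter_append]
          by_cases hcx : c = x.1
          · subst hcx
            rw [if_pos rfl, ih3]
            unfold pvGrp
            simp [pvProj]
          · rw [if_neg hcx, ih3]
            have hfx : ((x.1 == c) : Bool) = false := by
              simp only [beq_eq_false_iff_ne]; exact fun h => hcx h.symm
            unfold pvGrp
            simp [hfx]
      · have hc : (group_contigs_by_chrom p).2.contains x.1 = false := by rw [ih2]; simp [hm]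
        rw [hstep, if_neg (by simp [hc])]
        refine ⟨?_, ?_, ?_⟩
        · rw [ih1, List.map_append]; simp only [List.map_cons, List.map_nil]
          rw [pvDedup_append]; simp [hm]
        · intro c
          rw [PySem.Dict.contains_modify, PySem.Dict.contains_insert, ih2, Bool.eq_iff_iff, List.map_append]
          simp [List.mem_append, or_comm]
        · intro c
          simp only [PySem.Dict.modify]
          rw [PySem.Dict.getD_insert]
          unfold pvGrp
          rw [List.filter_append]
          by_cases hcx : c = x.1
          · subst hcx
            rw [if_pos rfl, PySem.Dict.getD_insert_self]
            have hgrp : p.filter (fun y => y.1 == x.1) = [] := by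
              rw [List.filter_eq_nil_iff]
              intro y hy hbeq
              exact hm (by
                have hy1 : y.1 = x.1 := by simpa using hbeq
                exact hy1 ▸ List.mem_map_of_mem hy)
            rw [hgrp]
            simp [pvProj]
          · rw [if_neg hcx, PySem.Dict.getD_insert_of_ne _ _ _ hcx, ih3]
            have hfx : ((x.1 == c) : Bool) = false := by
              simp only [beq_eq_false_iff_ne]; exact fun h => hcx h.symm
            unfold pvGrp
            simp [hfx]

-- === the enumerate/gap interleaving loop ===
lemma pvEnumFold {A : Type} (c : String) (f : A → (String × String × String × Int)) :
    ∀ (l : List A) (j n : Nat) (acc : List (String × String × String × Int)),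
      j + l.length = n →
      (l.zipIdx j).foldl (fun wg it =>
          let wg := wg ++ [f it.1]
          if (it.2 : Int) < (n : Int) - 1 then wg ++ [pvGap c] else wg) acc
        = acc ++ (match l with
            | [] => []
            | h :: t => f h :: t.flatMap (fun y => [pvGap c, f y])) := by
  intro l
  induction l with
  | nil => intro j n acc _; simp
  | cons h t ih =>
      intro j n acc hn
      rw [List.zipIdx_cons, List.foldl_cons]
      cases t with
      | nil =>
          have hj : ¬ ((j : Int) < (n : Int) - 1) := by simp at hn; omega
          simp [hj]
      | cons y t' =>
          have hj : (j : Int) < (n : Int) - 1 := by simp at hn; omega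
          simp only [hj, if_true]
          rw [ih (j + 1) n _ (by simp at hn ⊢; omega)]
          simp

lemma pvEnumFoldF {A : Type} (c : String) (f : A → (String × String × String × Int))
    (l : List A) (n : Nat) (hn : l.length = n) :
    (l.zipIdx).foldl (fun wg it =>
        let wg := wg ++ [f it.1]
        if (it.2 : Int) < (n : Int) - 1 then wg ++ [pvGap c] else wg) []
      = pvGapifyF f c l := by
  have := pvEnumFold c f l 0 n [] (by omega)
  rw [this]
  cases l <;> rfl

lemma pvGapifyF_congr (c : String) (f : (String × String × String × Int) → (String × String × String × Int))
    (l : List (String × String × String × Int)) (h : ∀ y ∈ l, f y = y) :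
    pvGapifyF f c l = pvGapify c l := by
  unfold pvGapify
  cases l with
  | nil => rfl
  | cons x t =>
      show f x :: t.flatMap (fun y => [pvGap c, f y]) = id x :: t.flatMap (fun y => [pvGap c, id y])
      rw [h x (by simp)]
      congr 1
      refine List.flatMap_congr fun y hy => ?_
      rw [h y (by simp [hy])]
      rfl

-- === A's result = flatMap of gapified blocks ===
lemma pvAtt_proj (c : String) (y : String × String × String × Int) (hy : y.1 = c) :
    pvAtt c (pvProj y) = y := by
  obtain ⟨a, b, d, e⟩ := y
  simp at hy
  simp [pvAtt, pvProj, hy]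

lemma pvA_char (p : List (String × String × String × Int)) :
    insert_gap p = (PySem.List.dedup (p.map (fun x => x.1))).flatMap (fun c => pvGapify c (pvSg p c)) := by
  obtain ⟨h1, _, h3⟩ := pvGroupChar p
  unfold insert_gap
  simp only []
  rw [PySem.List.foldl_append_eq_flatMap]
  rw [h1]
  simp only [List.nil_append]
  apply List.flatMap_congr
  intro c hc
  rw [h3 c]
  have hsorted : PySem.List.sorted ((pvGrp p c).map pvProj) (fun t => t.2.2) false
      = (pvSg p c).map pvProj := by
    rw [pvSorted_map]
    rfl
  rw [hsorted]
  rw [List.zipIdx_map, List.foldl_map, List.length_map]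
  have hmain := pvEnumFoldF c (fun y => pvAtt c (pvProj y)) (pvSg p c) (pvSg p c).length rfl
  rw [pvGapifyF_congr c _ _ (fun y hy => pvAtt_proj c y (pvSg_mem_fst p c y hy))] at hmain
  exact hmain

-- === B's gap pass over blocks ===
def pvBStep (st : List (String × String × String × Int) × Option String) (x : String × String × String × Int) :
    List (String × String × String × Int) × Option String :=
  ((if st.2 == some x.1 then st.1 ++ [(x.1, "GAP", ".", 0)] else st.1) ++ [x], some x.1)

lemma pvBBlock_tail (c : String) :
    ∀ (t : List (String × String × String × Int)) (acc : List (String × String × String × Int)),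
      (∀ y ∈ t, y.1 = c) →
      t.foldl pvBStep (acc, some c) = (acc ++ t.flatMap (fun y => [pvGap c, y]), some c) := by
  intro t
  induction t with
  | nil => intro acc _; simp
  | cons y t ih =>
      intro acc hall
      have hy : y.1 = c := hall y (by simp)
      rw [List.foldl_cons]
      have hstep : pvBStep (acc, some c) y = (acc ++ [pvGap c, y], some c) := by
        unfold pvBStep
        simp [hy, pvGap]
      rw [hstep, ih _ (fun z hz => hall z (by simp [hz]))]
      simp

lemma pvBBlock (c : String) (l : List (String × String × String × Int)) (acc : List (String × String × String × Int))
    (prev : Option String) (hne : l ≠ []) (hall : ∀ y ∈ l, y.1 = c) (hprev : prev ≠ some c) :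
    l.foldl pvBStep (acc, prev) = (acc ++ pvGapify c l, some c) := by
  cases l with
  | nil => exact absurd rfl hne
  | cons h t =>
      have hh : h.1 = c := hall h (by simp)
      rw [List.foldl_cons]
      have hstep : pvBStep (acc, prev) h = (acc ++ [h], some c) := by
        have hbe : (prev == some h.1) = false := by
          rw [hh]; exact beq_eq_false_iff_ne.mpr hprev
        unfold pvBStep
        rw [hbe]
        simp [hh]
      rw [hstep, pvBBlock_tail c t _ (fun z hz => hall z (by simp [hz]))]
      simp [pvGapify, pvGapifyF]

lemma pvBBlocks (g : String → List (String × String × String × Int)) :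
    ∀ (D : List String) (acc : List (String × String × String × Int)) (prev : Option String),
      D.Nodup → (∀ c ∈ D, g c ≠ [] ∧ ∀ y ∈ g c, y.1 = c) → (∀ c ∈ D, prev ≠ some c) →
      ((D.flatMap g).foldl pvBStep (acc, prev)).1 = acc ++ D.flatMap (fun c => pvGapify c (g c)) := by
  intro D
  induction D with
  | nil => intro acc prev _ _ _; simp
  | cons c D ih =>
      intro acc prev hnd hg hprev
      rw [List.flatMap_cons, List.foldl_append]
      rw [pvBBlock c (g c) acc prev (hg c (by simp)).1 (hg c (by simp)).2 (hprev c (by simp))]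
      rw [ih _ _ (List.nodup_cons.mp hnd).2 (fun c' hc' => hg c' (by simp [hc'])) ?_]
      · simp
      · intro c' hc'
        have : c ≠ c' := fun h => (List.nodup_cons.mp hnd).1 (h ▸ hc')
        simp [this]

-- === B's result ===
lemma pvB_char (p : List (String × String × String × Int)) :
    insert_gap_alt p = (PySem.List.dedup (p.map (fun x => x.1))).flatMap (fun c => pvGapify c (pvSg p c)) := by
  set D := PySem.List.dedup (p.map (fun x => x.1)) with hD
  have hnd : D.Nodup := PySem.List.nodup_dedup _
  unfold insert_gap_alt
  have hrank : PySem.List.sorted2 p (fun x => (pvRank p).getD x.1 0) (fun x => x.2.2.2) false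
      = PySem.List.sorted2 p (fun x => (D.idxOf x.1 : Int)) (fun x => x.2.2.2) false := by
    rw [pvSorted2_eq_foldl, pvSorted2_eq_foldl]
    apply pvSorted2_key_congr
    · intro a ha
      exact pvRank_getD p a.1 ((PySem.List.mem_dedup _ _).mpr (List.mem_map_of_mem ha))
    · intro a ha; simp at ha
  have hord : PySem.List.sorted2 p (fun x => (D.idxOf x.1 : Int)) (fun x => x.2.2.2) false
      = D.flatMap (fun c => pvSg p c) :=
    pvSorted2Blocks D hnd p (fun x hx => (PySem.List.mem_dedup _ _).mpr (List.mem_map_of_mem hx))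
  show ((PySem.List.sorted2 p (fun x => (pvRank p).getD x.1 0) (fun x => x.2.2.2) false).foldl pvBStep ([], none)).1 = _
  rw [hrank, hord]
  apply pvBBlocks
  · exact hnd
  · intro c hc
    constructor
    · rw [Ne, pvSg, PySem.List.sorted_eq_nil_iff]
      have hc' : c ∈ p.map (fun x => x.1) := (PySem.List.mem_dedup _ _).mp hc
      rcases List.mem_map.mp hc' with ⟨x, hx, hxc⟩
      intro hgrp
      have : x ∈ pvGrp p c := by
        unfold pvGrp
        exact List.mem_filter.mpr ⟨hx, by simp [hxc]⟩
      rw [hgrp] at this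
      simp at this
    · exact fun y hy => pvSg_mem_fst p c y hy
  · intro c _
    simp

-- ===== VERDICT (by name: the statement is the Claim_ definition above) =====
theorem insert_gap_spec : Claim_equal_insert_gap := by
  intro contigs _
  unfold Spec_insert_gap
  rw [pvA_char, pvB_char]
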